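-- pv_equiv track=rewrite | github.com/CocoFruit/AIROGIT | cola/utils.py | add_parents
-- ===== SOURCE A (Python) =====
-- def add_parents(paths):
--     """Iterate over each item in the set and add its parent directories."""
--     all_paths = set()
--     for path in paths:
--         while '//' in path:
--             path = path.replace('//', '/')
--         all_paths.add(path)
--         if '/' in path:
--             parent_dir = dirname(path)
--             while parent_dir:
--                 all_paths.add(parent_dir)
--                 parent_dir = dirname(parent_dir)
--     return all_paths
--
-- def dirname(path, current_dir=''):
--     """
--     An os.path.dirname() implementation that always uses '/'
--
--     Avoid os.path.dirname because git's output always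
--     uses '/' regardless of platform.
--
--     """
--     while '//' in path:
--         path = path.replace('//', '/')
--     path_dirname = path.rsplit('/', 1)[0]
--     if path_dirname == path:
--         return current_dir
--     return path.rsplit('/', 1)[0]
-- ===== SOURCE B (Python) =====
-- def add_parents(paths):
--     """Iterate over each item in the set and add its parent directories."""
--     all_paths = set()
--     for path in paths:
--         p = _collapse(path)
--         all_paths.add(p)
--         for i, c in reversed(list(enumerate(p))):
--             if c == '/' and i > 0:
--                 all_paths.add(p[:i])
--     return all_paths
--
--
-- def _collapse(path):
--     """Collapse every run of '/' to a single '/' in one pass."""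
--     out = []
--     prev = None
--     for c in path:
--         if c != '/' or prev != '/':
--             out.append(c)
--         prev = c
--     return ''.join(out)
-- ===== Notes on version B (the rewrite author's own statement) =====
-- stated objective: alternative
-- what changed: B replaces A's repeated whole-string replace('//','/') passes with a single left-to-right slash-collapsing pass, and replaces the upward dirname/rsplit loop with one reversed scan over the normalized path's character positions that adds each non-empty prefix ending just before a '/'.
import Mathlib
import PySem

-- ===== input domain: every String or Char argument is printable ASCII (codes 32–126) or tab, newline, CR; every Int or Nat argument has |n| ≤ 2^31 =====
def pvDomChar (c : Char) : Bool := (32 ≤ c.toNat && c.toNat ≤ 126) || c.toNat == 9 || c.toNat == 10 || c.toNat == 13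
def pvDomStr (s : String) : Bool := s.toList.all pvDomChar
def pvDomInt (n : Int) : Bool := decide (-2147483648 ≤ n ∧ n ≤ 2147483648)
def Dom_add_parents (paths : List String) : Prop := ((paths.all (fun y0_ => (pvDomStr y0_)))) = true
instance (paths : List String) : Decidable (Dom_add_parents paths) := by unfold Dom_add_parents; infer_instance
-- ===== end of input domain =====

-- B replaces A's repeated "replace('//','/')" passes and the upward dirname/rsplit loop by one
-- left-to-right slash-collapsing pass and a direct scan over slash positions adding prefixes
-- (objective: alternative decomposition, same exact result).

-- ===== PORT A =====

-- one `path.replace('//', '/')` step (on code points)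
def pvNormStep (s : List Char) : List Char := PySem.Chars.replace s ['/', '/'] ['/']

-- `while '//' in path: path = path.replace('//', '/')`; each pass shortens the string,
-- so `s.length + 1` fuel is always enough (fuel only makes the while-loop total).
def pvWhileNorm : Nat → List Char → List Char
  | 0, s => s
  | fuel + 1, s =>
    if PySem.Chars.isIn ['/', '/'] s then pvWhileNorm fuel (pvNormStep s) else s

-- hand port of `p.rsplit('/', 1)[0]` (PySem has no rsplit): everything before the LAST '/',
-- or p itself when there is no '/'; exact by the rsplit semantics.
def pvRsplitPrefix (p : List Char) : List Char :=
  match p.reverse.dropWhile (· ≠ '/') with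
  | [] => p
  | _ :: rest => rest.reverse

-- `dirname(path, current_dir='')` (A always uses the default current_dir)
def pvDirname (path : List Char) : List Char :=
  let p := pvWhileNorm (path.length + 1) path
  let d := pvRsplitPrefix p
  if d = p then [] else pvRsplitPrefix p

-- `while parent_dir: all_paths.add(parent_dir); parent_dir = dirname(parent_dir)`;
-- dirname strictly shortens a normalized nonempty path, so `parent.length + 1` fuel suffices.
def pvParentLoop : Nat → List Char → PySem.Set String → PySem.Set String
  | 0, _, s => s
  | fuel + 1, parent, s =>
    if parent = [] then s
    else pvParentLoop fuel (pvDirname parent) (PySem.Set.add s (String.ofList parent))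

-- the body of A's `for path in paths` loop
def pvBodyA (s : PySem.Set String) (path : String) : PySem.Set String :=
  let p := pvWhileNorm (path.toList.length + 1) path.toList
  let s1 := PySem.Set.add s (String.ofList p)
  if PySem.Chars.isIn ['/'] p then pvParentLoop (p.length + 1) (pvDirname p) s1 else s1

def add_parents (paths : List String) : List String :=
  paths.foldl pvBodyA PySem.Set.empty

-- ===== PORT B =====

-- `_collapse`: one pass, state = (out, prev)
def pvCollapse (path : List Char) : List Char :=
  (path.foldl
    (fun (acc : List Char × Option Char) c =>
      (if c ≠ '/' ∨ acc.2 ≠ some '/' then acc.1 ++ [c] else acc.1, some c))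
    ([], none)).1

-- the body of B's `for path in paths` loop; `p[:i]` for 0 < i is `p.take i.toNat`
def pvBodyB (s : PySem.Set String) (path : String) : PySem.Set String :=
  let p := pvCollapse path.toList
  let s1 := PySem.Set.add s (String.ofList p)
  (PySem.List.enumerate p).reverse.foldl
    (fun s ic => if ic.2 = '/' ∧ 0 < ic.1 then PySem.Set.add s (String.ofList (p.take ic.1.toNat)) else s)
    s1

def add_parents_alt (paths : List String) : List String :=
  paths.foldl pvBodyB PySem.Set.empty

-- ===== PRECONDITION & SPEC =====
def Spec_add_parents (paths : List String) (out : List String) : Prop := out = add_parents_alt paths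
instance (paths : List String) (out : List String) : Decidable (Spec_add_parents paths out) := by unfold Spec_add_parents; infer_instance

-- ===== CLAIM (what is proved, stated in full; the proofs are below) =====
def Claim_equal_add_parents : Prop := ∀ (paths : List String), Dom_add_parents paths → Spec_add_parents paths (add_parents paths)

-- ===== LEMMAS AND PROOFS =====

-- model of one replace('//','/') pass (left to right, non-overlapping)
def pvRep : List Char → List Char
  | [] => []
  | c :: t =>
    if c = '/' ∧ t.head? = some '/' then '/' :: pvRep t.tail else c :: pvRep t
termination_by l => l.length
decreasing_by all_goals simp [List.length_tail]

-- model of the collapsed string: drop a '/' whose predecessor is '/'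
def pvColl : Option Char → List Char → List Char
  | _, [] => []
  | prev, c :: t =>
    if c ≠ '/' ∨ prev ≠ some '/' then c :: pvColl (some c) t else pvColl (some c) t

-- ['/','/'] occurs in c :: r iff c and r's head are both '/', or it occurs in r
theorem pv_adj_cons (c : Char) (r : List Char) :
    (['/', '/'] <:+: c :: r) ↔ (c = '/' ∧ r.head? = some '/') ∨ (['/', '/'] <:+: r) := by
  cases r with
  | nil =>
    simp only [List.head?_nil, List.infix_cons_iff]
    constructor
    · rintro (h | h)
      · exact absurd h.length_le (by simp)
      · exact absurd h.length_le (by simp)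
    · rintro (⟨_, h⟩ | h)
      · exact absurd h (by simp)
      · exact absurd h.length_le (by simp)
  | cons d t =>
    rw [List.infix_cons_iff]
    constructor
    · rintro (h | h)
      · rw [List.cons_prefix_cons] at h
        obtain ⟨h1, h2⟩ := h
        rw [List.cons_prefix_cons] at h2
        exact Or.inl ⟨h1.symm, by simp [h2.1.symm]⟩
      · exact Or.inr h
    · rintro (⟨h1, h2⟩ | h)
      · left
        simp only [List.head?_cons, Option.some.injEq] at h2
        rw [List.cons_prefix_cons]
        exact ⟨h1.symm, by rw [List.cons_prefix_cons]; exact ⟨h2.symm, List.nil_prefix⟩⟩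
      · exact Or.inr h

theorem pvColl_eq_self_of_noadj (l : List Char) :
    (∀ c : Char, ¬ (['/', '/'] <:+: c :: l) → pvColl (some c) l = l) ∧
    (¬ (['/', '/'] <:+: l) → pvColl none l = l) := by
  induction l with
  | nil => exact ⟨fun _ _ => rfl, fun _ => rfl⟩
  | cons d t ih =>
    constructor
    · intro c h
      rw [pv_adj_cons] at h
      push_neg at h
      rw [pvColl]
      have hcond : d ≠ '/' ∨ some c ≠ some '/' := by
        by_cases hd : d = '/'
        · right
          intro hc
          simp only [Option.some.injEq] at hc
          exact absurd (by simp [hd]) (h.1 hc)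
        · exact Or.inl hd
      rw [if_pos hcond, (ih).1 d h.2]
    · intro h
      rw [pvColl, if_pos (Or.inr (by simp)), (ih).1 d h]

theorem pvRep_go (fuel : Nat) :
    ∀ (l acc : List Char), l.length ≤ fuel →
      PySem.Chars.replace.go ['/', '/'] ['/'] fuel l acc = acc.reverse ++ pvRep l := by
  induction fuel with
  | zero =>
    intro l acc h
    have : l = [] := List.eq_nil_of_length_eq_zero (Nat.le_zero.mp h)
    subst this
    simp [PySem.Chars.replace.go, pvRep]
  | succ f ih =>
    intro l acc h
    rcases l with _ | ⟨c, (_ | ⟨d, t⟩)⟩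
    · simp [PySem.Chars.replace.go, pvRep]
    · rw [PySem.Chars.replace.go]
      have hp : List.isPrefixOf ['/', '/'] [c] = false := by
        simp [List.isPrefixOf]
      rw [hp]
      simp only [Bool.false_eq_true, if_false]
      rw [ih [] (c :: acc) (by simp)]
      simp [pvRep]
    · rw [PySem.Chars.replace.go]
      by_cases hcd : c = '/' ∧ d = '/'
      · obtain ⟨hc, hd⟩ := hcd
        subst hc; subst hd
        have hp : List.isPrefixOf ['/', '/'] ('/' :: '/' :: t) = true := by
          simp [List.isPrefixOf]
        rw [hp]
        simp only [if_true]
        rw [ih _ _ (by simp at h ⊢; omega)]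
        conv_rhs => rw [pvRep]
        rw [if_pos ⟨rfl, by simp⟩]
        simp
      · have hp : List.isPrefixOf ['/', '/'] (c :: d :: t) = false := by
          simp [List.isPrefixOf]
          intro hc hd
          exact hcd ⟨hc.symm, hd.symm⟩
        rw [hp]
        simp only [Bool.false_eq_true, if_false]
        rw [ih (d :: t) (c :: acc) (by simp at h ⊢; omega)]
        conv_rhs => rw [pvRep]
        rw [if_neg (fun hh => hcd ⟨hh.1, by simpa using hh.2⟩)]
        simp

theorem pvNormStep_eq_rep (s : List Char) : pvNormStep s = pvRep s := by
  rw [pvNormStep, PySem.Chars.replace]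
  rw [if_neg (by simp)]
  rw [pvRep_go s.length s [] le_rfl]
  simp

theorem pvColl_rep (l : List Char) : ∀ prev, pvColl prev (pvRep l) = pvColl prev l := by
  induction l using pvRep.induct with
  | case1 => intro prev; simp [pvRep]
  | case2 c t hif ih =>
    intro prev
    obtain ⟨hc, hh⟩ := hif
    subst hc
    rcases t with _ | ⟨d, t'⟩
    · simp at hh
    · simp only [List.head?_cons, Option.some.injEq] at hh
      subst hh
      simp only [List.tail_cons] at ih
      rw [pvRep, if_pos ⟨rfl, by simp⟩]
      simp only [List.tail_cons]
      by_cases hprev : prev = some '/'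
      · subst hprev
        simp only [pvColl, ne_eq, not_true_eq_false, or_self, if_false]
        exact ih (some '/')
      · simp only [pvColl, if_pos (Or.inr hprev), ne_eq, not_true_eq_false, false_or,
          not_false_eq_true, or_true, if_true, or_self, if_false]
        rw [ih (some '/')]
  | case3 c t hif ih =>
    intro prev
    rw [pvRep, if_neg hif]
    rw [pvColl, pvColl]
    by_cases hcond : c ≠ '/' ∨ prev ≠ some '/'
    · rw [if_pos hcond, if_pos hcond, ih (some c)]
    · rw [if_neg hcond, if_neg hcond, ih (some c)]

theorem pvRep_length_le (l : List Char) : (pvRep l).length ≤ l.length := by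
  induction l using pvRep.induct with
  | case1 => simp [pvRep]
  | case2 c t hif ih =>
    rw [pvRep, if_pos hif]
    have h1 := ih
    simp only [List.length_cons, List.length_tail] at *
    omega
  | case3 c t hif ih =>
    rw [pvRep, if_neg hif]
    simpa using ih

theorem pvRep_length_lt (l : List Char) (h : ['/', '/'] <:+: l) : (pvRep l).length < l.length := by
  induction l using pvRep.induct with
  | case1 => exact absurd h.length_le (by simp)
  | case2 c t hif ih =>
    rw [pvRep, if_pos hif]
    obtain ⟨hc, hh⟩ := hif
    rcases t with _ | ⟨d, t'⟩
    · simp at hh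
    · have := pvRep_length_le t'
      simp at this ⊢
      omega
  | case3 c t hif ih =>
    rw [pvRep, if_neg hif]
    rw [pv_adj_cons] at h
    rcases h with ⟨hc, hh⟩ | h
    · exact absurd ⟨hc, hh⟩ hif
    · simpa using ih h

theorem pvWhileNorm_eq_coll (fuel : Nat) :
    ∀ s : List Char, s.length < fuel → pvWhileNorm fuel s = pvColl none s := by
  induction fuel with
  | zero => intro s h; omega
  | succ f ih =>
    intro s h
    rw [pvWhileNorm]
    by_cases hin : PySem.Chars.isIn ['/', '/'] s = true
    · rw [if_pos hin, pvNormStep_eq_rep]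
      have hadj : ['/', '/'] <:+: s := (PySem.Chars.isIn_iff_infix _ _).mp hin
      have hlt := pvRep_length_lt s hadj
      rw [ih (pvRep s) (by simp at h ⊢; omega)]
      exact pvColl_rep s none
    · rw [if_neg (by simpa using hin)]
      exact ((pvColl_eq_self_of_noadj s).2
        ((PySem.Chars.isIn_eq_false_iff _ _).mp (by simpa using hin))).symm

theorem pvCollapse_fold (cs : List Char) :
    ∀ (acc : List Char) (prev : Option Char),
      (cs.foldl
        (fun (acc : List Char × Option Char) c =>
          (if c ≠ '/' ∨ acc.2 ≠ some '/' then acc.1 ++ [c] else acc.1, some c))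
        (acc, prev)).1 = acc ++ pvColl prev cs := by
  induction cs with
  | nil => intro acc prev; simp [pvColl]
  | cons c t ih =>
    intro acc prev
    rw [List.foldl_cons, pvColl]
    by_cases hcond : c ≠ '/' ∨ prev ≠ some '/'
    · simp only [if_pos hcond]
      rw [ih (acc ++ [c]) (some c), List.append_assoc]
      rfl
    · simp only [if_neg hcond]
      rw [ih acc (some c)]

theorem pvCollapse_eq_coll (cs : List Char) : pvCollapse cs = pvColl none cs := by
  rw [pvCollapse, pvCollapse_fold cs [] none]
  simp

-- the collapsed string has no '//' (and, after a '/', does not start with '/')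
theorem pvColl_noadj (l : List Char) :
    ∀ prev, ¬ (['/', '/'] <:+: pvColl prev l) ∧
      (prev = some '/' → (pvColl prev l).head? ≠ some '/') := by
  induction l with
  | nil =>
    intro prev
    exact ⟨fun h => absurd h.length_le (by simp [pvColl]), fun _ => by simp [pvColl]⟩
  | cons c t ih =>
    intro prev
    by_cases hcond : c ≠ '/' ∨ prev ≠ some '/'
    · rw [pvColl, if_pos hcond]
      constructor
      · rw [pv_adj_cons]
        rintro (⟨hc, hh⟩ | h)
        · subst hc
          exact (ih (some '/')).2 rfl hh
        · exact (ih (some c)).1 h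
      · intro hp
        simp only [List.head?_cons, ne_eq, Option.some.injEq]
        rcases hcond with hc | hpv
        · exact hc
        · exact absurd hp hpv
    · push_neg at hcond
      obtain ⟨hc, hpv⟩ := hcond
      rw [pvColl, if_neg (by simp [hc, hpv])]
      subst hc
      exact ⟨(ih (some '/')).1, fun _ => (ih (some '/')).2 rfl⟩

theorem pv_noadj_of_infix {l m : List Char} (h : l <:+: m) (hm : ¬ (['/', '/'] <:+: m)) :
    ¬ (['/', '/'] <:+: l) :=
  fun h2 => hm (h2.trans h)

-- the add-list of A's while loop
def pvChain : Nat → List Char → List (List Char)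
  | 0, _ => []
  | fuel + 1, parent => if parent = [] then [] else parent :: pvChain fuel (pvDirname parent)

theorem pvParentLoop_eq_update (fuel : Nat) :
    ∀ (parent : List Char) (s : PySem.Set String),
      pvParentLoop fuel parent s = PySem.Set.update s ((pvChain fuel parent).map String.ofList) := by
  induction fuel with
  | zero => intro parent s; simp [pvParentLoop, pvChain, PySem.Set.update]
  | succ f ih =>
    intro parent s
    rw [pvParentLoop, pvChain]
    by_cases hp : parent = []
    · rw [if_pos hp, if_pos hp]
      simp [PySem.Set.update]
    · rw [if_neg hp, if_neg hp, ih]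
      simp [PySem.Set.update]

-- fold-with-if over a list is Set.update with the filtered, mapped list
theorem pv_foldl_if_update {α : Type} (p : α → Prop) [DecidablePred p] (g : α → String) :
    ∀ (xs : List α) (s : PySem.Set String),
      xs.foldl (fun s x => if p x then PySem.Set.add s (g x) else s) s
        = PySem.Set.update s ((xs.filter (fun x => decide (p x))).map g) := by
  intro xs
  induction xs with
  | nil => intro s; simp [PySem.Set.update]
  | cons x xs ih =>
    intro s
    rw [List.foldl_cons]
    by_cases hx : p x
    · rw [if_pos hx, ih, List.filter_cons_of_pos (by simpa using hx)]
      simp [PySem.Set.update]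
    · rw [if_neg hx, ih, List.filter_cons_of_neg (by simpa using hx)]

-- B's prefix list, on code points
def pvPlist (q : List Char) : List (List Char) :=
  ((PySem.List.enumerate q).reverse.filter (fun ic => decide (ic.2 = '/' ∧ 0 < ic.1))).map
    (fun ic => q.take ic.1.toNat)

theorem pv_enumerate_append {α : Type} (xs : List α) (c : α) :
    ∀ k : Int, PySem.List.enumerate (xs ++ [c]) k
      = PySem.List.enumerate xs k ++ [(k + xs.length, c)] := by
  induction xs with
  | nil => intro k; simp [PySem.List.enumerate]
  | cons x xs ih =>
    intro k
    simp only [List.cons_append, PySem.List.enumerate, ih (k + 1), List.length_cons]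
    rw [show (k + (((xs.length + 1 : Nat)) : Int)) = (k + 1) + (xs.length : Int) by push_cast; ring]

theorem pv_mem_enumerate {α : Type} (xs : List α) :
    ∀ (k : Int) (ic : Int × α), ic ∈ PySem.List.enumerate xs k → k ≤ ic.1 ∧ ic.1 < k + xs.length := by
  induction xs with
  | nil => intro k ic h; simp [PySem.List.enumerate] at h
  | cons x xs ih =>
    intro k ic h
    simp only [PySem.List.enumerate, List.mem_cons] at h
    rcases h with rfl | h
    · simp only [List.length_cons]
      push_cast
      omega
    · have := ih (k + 1) ic h
      simp only [List.length_cons]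
      push_cast at this ⊢
      omega

theorem pvPlist_append (q : List Char) (c : Char) :
    pvPlist (q ++ [c]) = (if c = '/' ∧ 0 < q.length then [q] else []) ++ pvPlist q := by
  have hmem : ∀ ic ∈ (PySem.List.enumerate q).reverse.filter
      (fun ic => decide (ic.2 = '/' ∧ 0 < ic.1)), 0 ≤ ic.1 ∧ ic.1 < (q.length : Int) := by
    intro ic hic
    have h1 := List.mem_reverse.mp (List.mem_filter.mp hic).1
    have h2 := pv_mem_enumerate q 0 ic h1
    omega
  have hmap : ((PySem.List.enumerate q).reverse.filter
        (fun ic => decide (ic.2 = '/' ∧ 0 < ic.1))).map (fun ic => (q ++ [c]).take ic.1.toNat)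
      = ((PySem.List.enumerate q).reverse.filter
        (fun ic => decide (ic.2 = '/' ∧ 0 < ic.1))).map (fun ic => q.take ic.1.toNat) := by
    apply List.map_congr_left
    intro ic hic
    obtain ⟨h0, hlt⟩ := hmem ic hic
    rw [List.take_append_of_le_length (by omega)]
  unfold pvPlist
  rw [pv_enumerate_append q c 0, List.reverse_append]
  simp only [zero_add, List.reverse_singleton, List.singleton_append, List.filter_cons]
  by_cases hc : c = '/' ∧ 0 < q.length
  · have hd : (decide ((((q.length : Int)), c).2 = '/' ∧ 0 < (((q.length : Int), c)).1)) = true := by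
      simp only [decide_eq_true_eq]
      exact ⟨hc.1, by exact_mod_cast hc.2⟩
    rw [if_pos hc, hd]
    simp only [if_true, List.map_cons]
    rw [hmap]
    congr 1
    rw [Int.toNat_natCast, List.take_left]
  · have hd : (decide ((((q.length : Int)), c).2 = '/' ∧ 0 < (((q.length : Int), c)).1)) = false := by
      simp only [decide_eq_false_iff_not]
      intro hh
      exact hc ⟨hh.1, by exact_mod_cast hh.2⟩
    rw [if_neg hc, hd]
    simp only [Bool.false_eq_true, if_false, List.nil_append]
    exact hmap

theorem pvNorm_id (q : List Char) (hq : ¬ (['/', '/'] <:+: q)) :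
    pvWhileNorm (q.length + 1) q = q := by
  rw [pvWhileNorm_eq_coll (q.length + 1) q (by omega)]
  exact (pvColl_eq_self_of_noadj q).2 hq

theorem pvDirname_no_slash (q : List Char) (hq : ¬ (['/', '/'] <:+: q)) (h : '/' ∉ q) :
    pvDirname q = [] := by
  have hdrop : q.reverse.dropWhile (· ≠ '/') = [] := by
    rw [List.dropWhile_eq_nil_iff]
    intro x hx
    simp only [ne_eq, decide_eq_true_eq]
    intro hx'
    exact h (by rw [← hx']; exact List.mem_reverse.mp hx)
  have hr : pvRsplitPrefix q = q := by
    rw [pvRsplitPrefix, hdrop]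
  rw [pvDirname]
  simp only [pvNorm_id q hq, hr]
  simp

theorem pvDirname_append_slash (q : List Char) (hq : ¬ (['/', '/'] <:+: q ++ ['/'])) (h : q ≠ []) :
    pvDirname (q ++ ['/']) = q := by
  have hr : pvRsplitPrefix (q ++ ['/']) = q := by
    rw [pvRsplitPrefix]
    simp only [List.reverse_append, List.reverse_singleton, List.singleton_append,
      List.dropWhile_cons, ne_eq, not_true_eq_false, decide_false, Bool.false_eq_true, if_false]
    simp
  rw [pvDirname]
  simp only [pvNorm_id _ hq, hr]
  rw [if_neg (by intro he; exact absurd (congrArg List.length he) (by simp))]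

theorem pvDirname_append_other (q : List Char) (c : Char)
    (hq : ¬ (['/', '/'] <:+: q ++ [c])) (hc : c ≠ '/') (h : '/' ∈ q) :
    pvDirname (q ++ [c]) = pvDirname q := by
  have hq' : ¬ (['/', '/'] <:+: q) := pv_noadj_of_infix (List.prefix_append q [c]).isInfix hq
  obtain ⟨a, rest, hdrop⟩ : ∃ a rest, q.reverse.dropWhile (· ≠ '/') = a :: rest := by
    rcases hh : q.reverse.dropWhile (· ≠ '/') with _ | ⟨a, rest⟩
    · rw [List.dropWhile_eq_nil_iff] at hh
      have := hh '/' (List.mem_reverse.mpr h)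
      simp at this
    · exact ⟨a, rest, rfl⟩
  have hlen : rest.length < q.length := by
    have := List.length_dropWhile_le (fun x => decide (x ≠ '/')) q.reverse
    rw [hdrop] at this
    simp at this
    omega
  have hr1 : pvRsplitPrefix (q ++ [c]) = rest.reverse := by
    rw [pvRsplitPrefix]
    simp only [List.reverse_append, List.reverse_singleton, List.singleton_append,
      List.dropWhile_cons, hdrop]
    rw [if_pos (by simp [hc])]
  have hr2 : pvRsplitPrefix q = rest.reverse := by
    rw [pvRsplitPrefix, hdrop]
  rw [pvDirname, pvDirname]
  simp only [pvNorm_id _ hq, pvNorm_id _ hq', hr1, hr2]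
  rw [if_neg (by intro he; exact absurd (congrArg List.length he) (by simp; omega)),
    if_neg (by intro he; exact absurd (congrArg List.length he) (by simp; omega))]

-- the core: A's dirname chain = B's slash-prefix list, on a collapsed string
theorem pvChain_eq_plist (q : List Char) :
    ¬ (['/', '/'] <:+: q) → ∀ fuel : Nat, q.length < fuel →
      (if PySem.Chars.isIn ['/'] q then pvChain fuel (pvDirname q) else []) = pvPlist q := by
  induction q using List.reverseRecOn with
  | nil =>
    intro _ fuel _
    have h1 : PySem.Chars.isIn ['/'] ([] : List Char) = false := by decide
    have h2 : pvPlist [] = [] := by decide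
    rw [h1, h2]
    simp
  | append_singleton q c ih =>
    intro hq fuel hf
    have hq' : ¬ (['/', '/'] <:+: q) := pv_noadj_of_infix (List.prefix_append q [c]).isInfix hq
    rw [pvPlist_append]
    by_cases hc : c = '/'
    · subst hc
      have hin : PySem.Chars.isIn ['/'] (q ++ ['/']) = true := by
        rw [PySem.Chars.isIn_iff_infix, List.singleton_infix_iff]
        simp
      rw [if_pos hin]
      by_cases hq0 : q = []
      · subst hq0
        have hD : pvDirname ['/'] = [] := by decide
        have hP : pvPlist [] = [] := by decide
        simp only [List.nil_append] at *
        rw [hD, hP]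
        obtain ⟨f, rfl⟩ : ∃ f, fuel = f + 1 := ⟨fuel - 1, by omega⟩
        rw [pvChain, if_pos rfl]
        simp
      · rw [if_pos ⟨rfl, List.length_pos_of_ne_nil hq0⟩]
        rw [pvDirname_append_slash q hq hq0]
        obtain ⟨f, rfl⟩ : ∃ f, fuel = f + 1 := ⟨fuel - 1, by omega⟩
        rw [pvChain, if_neg hq0]
        have hf' : q.length < f := by simp at hf; omega
        have hih := ih hq' f hf'
        simp only [List.singleton_append, List.cons.injEq, true_and]
        by_cases hin2 : PySem.Chars.isIn ['/'] q = true
        · rw [if_pos hin2] at hih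
          exact hih
        · rw [if_neg (by simpa using hin2)] at hih
          have hmem : '/' ∉ q := by
            intro hm
            exact hin2 (by rw [PySem.Chars.isIn_iff_infix, List.singleton_infix_iff]; exact hm)
          rw [pvDirname_no_slash q hq' hmem]
          obtain ⟨f', rfl⟩ : ∃ f', f = f' + 1 := ⟨f - 1, by omega⟩
          rw [pvChain, if_pos rfl]
          exact hih
    · rw [if_neg (show ¬(c = '/' ∧ 0 < q.length) from fun hh => hc hh.1), List.nil_append]
      by_cases hmem : '/' ∈ q
      · have hin : PySem.Chars.isIn ['/'] (q ++ [c]) = true := by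
          rw [PySem.Chars.isIn_iff_infix, List.singleton_infix_iff]
          exact List.mem_append_left _ hmem
        have hin2 : PySem.Chars.isIn ['/'] q = true := by
          rw [PySem.Chars.isIn_iff_infix, List.singleton_infix_iff]
          exact hmem
        rw [if_pos hin, pvDirname_append_other q c hq hc hmem]
        have hih := ih hq' fuel (by simp at hf; omega)
        rw [if_pos hin2] at hih
        exact hih
      · have hin : PySem.Chars.isIn ['/'] (q ++ [c]) = false := by
          rw [← Bool.not_eq_true, PySem.Chars.isIn_iff_infix, List.singleton_infix_iff]
          simp only [List.mem_append, List.mem_singleton]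
          rintro (hm | hm)
          · exact hmem hm
          · exact hc hm.symm
        have hin2 : PySem.Chars.isIn ['/'] q = false := by
          rw [← Bool.not_eq_true, PySem.Chars.isIn_iff_infix, List.singleton_infix_iff]
          exact hmem
        rw [hin]
        have hih := ih hq' fuel (by simp at hf; omega)
        rw [hin2] at hih
        simpa using hih

theorem pvBody_eq : pvBodyA = pvBodyB := by
  funext s path
  have hA : pvWhileNorm (path.toList.length + 1) path.toList = pvColl none path.toList :=
    pvWhileNorm_eq_coll _ path.toList (by omega)
  have hB : pvCollapse path.toList = pvColl none path.toList := pvCollapse_eq_coll path.toList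
  set q := pvColl none path.toList with hqdef
  have hqAdj : ¬ (['/', '/'] <:+: q) := (pvColl_noadj path.toList none).1
  have hchain := pvChain_eq_plist q hqAdj (q.length + 1) (by omega)
  rw [pvBodyA, pvBodyB]
  simp only [hA, hB]
  set s1 := PySem.Set.add s (String.ofList q) with hs1
  have hBside : (PySem.List.enumerate q).reverse.foldl
      (fun s ic => if ic.2 = '/' ∧ 0 < ic.1 then PySem.Set.add s (String.ofList (q.take ic.1.toNat)) else s) s1
      = PySem.Set.update s1 ((pvPlist q).map String.ofList) := by
    rw [pv_foldl_if_update (fun ic : Int × Char => ic.2 = '/' ∧ 0 < ic.1)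
      (fun ic : Int × Char => String.ofList (q.take ic.1.toNat)) ((PySem.List.enumerate q).reverse) s1]
    rw [pvPlist, List.map_map]
    rfl
  rw [hBside]
  by_cases hin : PySem.Chars.isIn ['/'] q = true
  · rw [if_pos hin] at hchain ⊢
    rw [pvParentLoop_eq_update, hchain]
  · rw [if_neg (by simpa using hin)] at hchain ⊢
    rw [← hchain]
    simp [PySem.Set.update]

-- ===== VERDICT (by name: the statement is the Claim_ definition above) =====
theorem add_parents_spec : Claim_equal_add_parents := by
  intro paths _
  unfold Spec_add_parents add_parents add_parents_alt
  rw [pvBody_eq]
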